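-- pv_equiv track=rewrite | github.com/chrinide/pyscf-scripts | tools/doubles.py | doubleexcitations
-- ===== SOURCE A (Python) =====
-- def doubleexcitations(nocc,nvir):
--     doubles = []
--     for occa in nocc:
--         for occb in nocc:
--             for virta in nvir:
--                 for virtb in nvir:
--                     doubles.append((occa,occb,virta,virtb))
--     return doubles
-- ===== SOURCE B (Python) =====
-- def doubleexcitations(nocc, nvir):
--     # Single flat loop: decode each index of range(n*n*m*m) by mixed-radix divmod.
--     n = len(nocc)
--     m = len(nvir)
--     out = []
--     for k in range(n * n * m * m):
--         k1, d = divmod(k, m)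
--         k2, c = divmod(k1, m)
--         a, b = divmod(k2, n)
--         out.append((nocc[a], nocc[b], nvir[c], nvir[d]))
--     return out
-- ===== Notes on version B (the rewrite author's own statement) =====
-- stated objective: alternative
-- what changed: Replaces the four nested appending loops by a single flat loop over range(n*n*m*m) that decodes each counter value into the four indices by mixed-radix divmod and indexes the lists directly.
import Mathlib
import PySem

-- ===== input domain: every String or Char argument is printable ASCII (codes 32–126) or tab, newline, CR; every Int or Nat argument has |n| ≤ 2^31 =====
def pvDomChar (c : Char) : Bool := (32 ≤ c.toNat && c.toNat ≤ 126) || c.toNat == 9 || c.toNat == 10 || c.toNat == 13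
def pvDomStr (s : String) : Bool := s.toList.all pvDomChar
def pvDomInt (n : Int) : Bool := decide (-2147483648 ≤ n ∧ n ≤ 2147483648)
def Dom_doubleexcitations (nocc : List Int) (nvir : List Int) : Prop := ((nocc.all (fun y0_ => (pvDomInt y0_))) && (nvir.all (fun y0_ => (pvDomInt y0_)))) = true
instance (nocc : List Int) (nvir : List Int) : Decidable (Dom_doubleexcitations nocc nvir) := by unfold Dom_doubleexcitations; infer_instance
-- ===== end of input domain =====

-- B enumerates one flat counter range(n*n*m*m) and decodes each value into the four
-- indices by mixed-radix divmod; alternative decomposition, same cost.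

-- ===== PORT A =====
-- four nested loops, each appending to the accumulator 'doubles'
def doubleexcitations (nocc : List Int) (nvir : List Int) : List (Int × Int × Int × Int) :=
  nocc.foldl (fun doubles occa =>
    nocc.foldl (fun doubles occb =>
      nvir.foldl (fun doubles virta =>
        nvir.foldl (fun doubles virtb => doubles ++ [(occa, occb, virta, virtb)])
          doubles) doubles) doubles) []

-- ===== PORT B =====
-- Python's nocc[a] etc.: every decoded index is provably in range (a,b < n; c,d < m for
-- k < n*n*m*m), so the in-range access is ported exactly by getD with an unused default.
def doubleexcitations_alt (nocc : List Int) (nvir : List Int) : List (Int × Int × Int × Int) :=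
  let n := nocc.length
  let m := nvir.length
  (List.range (n * n * m * m)).map (fun k =>
    let d := k % m
    let k1 := k / m
    let c := k1 % m
    let k2 := k1 / m
    let b := k2 % n
    let a := k2 / n
    (nocc.getD a 0, nocc.getD b 0, nvir.getD c 0, nvir.getD d 0))

-- ===== PRECONDITION & SPEC =====
def Spec_doubleexcitations (nocc : List Int) (nvir : List Int) (out : List (Int × Int × Int × Int)) : Prop := out = doubleexcitations_alt nocc nvir
instance (nocc : List Int) (nvir : List Int) (out : List (Int × Int × Int × Int)) : Decidable (Spec_doubleexcitations nocc nvir out) := by unfold Spec_doubleexcitations; infer_instance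

-- ===== CLAIM (what is proved, stated in full; the proofs are below) =====
def Claim_equal_doubleexcitations : Prop := ∀ (nocc : List Int) (nvir : List Int), Dom_doubleexcitations nocc nvir → Spec_doubleexcitations nocc nvir (doubleexcitations nocc nvir)

-- ===== LEMMAS AND PROOFS =====

-- A's loops, innermost outwards, are repeated 'append one element' folds; each collapses to a flatMap.
theorem doubleexcitations_eq_flatMap (nocc nvir : List Int) :
    doubleexcitations nocc nvir =
      nocc.flatMap (fun occa => nocc.flatMap (fun occb =>
        nvir.flatMap (fun virta => nvir.map (fun virtb => (occa, occb, virta, virtb))))) := by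
  unfold doubleexcitations
  simp only [PySem.List.foldl_append_singleton_eq_map, PySem.List.foldl_append_eq_flatMap,
    List.nil_append]

-- Splitting off one mixed-radix digit: mapping a decoder over range (len·m) is a flatMap
-- over the list of the digit's elements, with the remainder fed to the rest of the decoder.
theorem map_range_digit {α β : Type} (xs : List α) (x0 : α) (m : ℕ) (g : α → ℕ → β) :
    (List.range (xs.length * m)).map (fun k => g (xs.getD (k / m) x0) (k % m))
      = xs.flatMap (fun x => (List.range m).map (fun r => g x r)) := by
  induction xs with
  | nil => simp
  | cons x xs ih =>
    rcases Nat.eq_zero_or_pos m with hm | hm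
    · simp [hm]
    · rw [List.flatMap_cons, List.length_cons,
        show (xs.length + 1) * m = m + xs.length * m by ring, List.range_add,
        List.map_append, List.map_map]
      congr 1
      · apply List.map_congr_left
        intro k hk
        have hk' := List.mem_range.mp hk
        simp [Nat.div_eq_of_lt hk', Nat.mod_eq_of_lt hk']
      · rw [← ih]
        apply List.map_congr_left
        intro j _
        simp [Function.comp, Nat.add_comm m j, Nat.add_div_right _ hm, Nat.add_mod_right]

-- mapping getD over range of the length is just map
theorem map_range_getD {α β : Type} (xs : List α) (x0 : α) (f : α → β) :
    (List.range xs.length).map (fun t => f (xs.getD t x0)) = xs.map f := by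
  induction xs with
  | nil => simp
  | cons x xs ih =>
    rw [List.length_cons, show xs.length + 1 = 1 + xs.length by ring, List.range_add,
      List.map_append, List.map_map]
    have h : ((fun t => f ((x :: xs).getD t x0)) ∘ fun t => 1 + t)
        = (fun t => f (xs.getD t x0)) := by
      funext t
      simp [Function.comp, Nat.add_comm 1 t]
    rw [h, ih]
    simp [List.map_cons]

-- decoder local names (proof-only helpers)
def decBC (nvir : List Int) (a b : Int) (s : Nat) : Int × Int × Int × Int :=
  (a, b, nvir.getD (s / nvir.length % nvir.length) 0, nvir.getD (s % nvir.length) 0)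

def decB (nocc nvir : List Int) (a : Int) (r : Nat) : Int × Int × Int × Int :=
  (a, nocc.getD (r / nvir.length / nvir.length % nocc.length) 0,
   nvir.getD (r / nvir.length % nvir.length) 0, nvir.getD (r % nvir.length) 0)

-- innermost two digits: a range over m*m decodes into the two virtual-orbital loops
theorem alt_stepC (nvir : List Int) (a b : Int) :
    (List.range (nvir.length * nvir.length)).map (decBC nvir a b)
    = nvir.flatMap (fun c => nvir.map (fun d => (a, b, c, d))) := by
  have h1 : (List.range (nvir.length * nvir.length)).map (decBC nvir a b)
      = (List.range (nvir.length * nvir.length)).map (fun s => (a, b, nvir.getD (s / nvir.length) 0, nvir.getD (s % nvir.length % nvir.length) 0)) := by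
    apply List.map_congr_left
    intro s hs
    have hslt := List.mem_range.mp hs
    have hm : 0 < nvir.length := by
      rcases Nat.eq_zero_or_pos nvir.length with h | h
      · rw [h] at hslt; omega
      · exact h
    have hdiv : s / nvir.length < nvir.length := (Nat.div_lt_iff_lt_mul hm).mpr hslt
    simp [decBC, Nat.mod_eq_of_lt hdiv, Nat.mod_mod_of_dvd _ (dvd_refl nvir.length)]
  have h2 := map_range_digit nvir 0 nvir.length (fun x t => (a, b, x, nvir.getD (t % nvir.length) 0))
  rw [h1, h2]
  congr 1
  funext x
  have h3 : (List.range nvir.length).map (fun t => (a, b, x, nvir.getD (t % nvir.length) 0))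
      = (List.range nvir.length).map (fun t => (a, b, x, nvir.getD t 0)) := by
    apply List.map_congr_left
    intro t ht
    simp [Nat.mod_eq_of_lt (List.mem_range.mp ht)]
  rw [h3]
  exact map_range_getD nvir 0 (fun d => (a, b, x, d))

-- third digit: a range over n*(m*m) decodes into the second occupied loop plus alt_stepC
theorem alt_stepB (nocc nvir : List Int) (a : Int) :
    (List.range (nocc.length * (nvir.length * nvir.length))).map (decB nocc nvir a)
    = nocc.flatMap (fun b => nvir.flatMap (fun c => nvir.map (fun d => (a, b, c, d)))) := by
  have h1 : (List.range (nocc.length * (nvir.length * nvir.length))).map (decB nocc nvir a)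
      = (List.range (nocc.length * (nvir.length * nvir.length))).map (fun r => decBC nvir a (nocc.getD (r / (nvir.length * nvir.length)) 0) (r % (nvir.length * nvir.length))) := by
    apply List.map_congr_left
    intro r hr
    have hrlt := List.mem_range.mp hr
    have hmm : 0 < nvir.length * nvir.length := by
      rcases Nat.eq_zero_or_pos (nvir.length * nvir.length) with h | h
      · rw [h, Nat.mul_zero] at hrlt; omega
      · exact h
    have hdiv : r / (nvir.length * nvir.length) < nocc.length :=
      (Nat.div_lt_iff_lt_mul hmm).mpr (Nat.mul_comm nocc.length (nvir.length * nvir.length) ▸ hrlt)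
    unfold decB decBC
    rw [Nat.div_div_eq_div_mul, Nat.mod_eq_of_lt hdiv,
      Nat.mod_mul_right_div_self, Nat.mod_mod_of_dvd _ (dvd_refl nvir.length),
      Nat.mod_mod_of_dvd _ (Dvd.intro nvir.length rfl)]
  have h2 := map_range_digit nocc 0 (nvir.length * nvir.length) (fun x s => decBC nvir a x s)
  rw [h1, h2]
  congr 1
  funext x
  exact alt_stepC nvir a x

-- full decoder: B's flat range decodes into A's four nested loops
theorem doubleexcitations_spec_core (nocc nvir : List Int) :
    doubleexcitations nocc nvir = doubleexcitations_alt nocc nvir := by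
  rw [doubleexcitations_eq_flatMap]
  refine Eq.symm ?_
  show (List.range (nocc.length * nocc.length * nvir.length * nvir.length)).map (fun k => (nocc.getD (k / nvir.length / nvir.length / nocc.length) 0, nocc.getD (k / nvir.length / nvir.length % nocc.length) 0, nvir.getD (k / nvir.length % nvir.length) 0, nvir.getD (k % nvir.length) 0)) = _
  have h1 : (List.range (nocc.length * nocc.length * nvir.length * nvir.length)).map (fun k => (nocc.getD (k / nvir.length / nvir.length / nocc.length) 0, nocc.getD (k / nvir.length / nvir.length % nocc.length) 0, nvir.getD (k / nvir.length % nvir.length) 0, nvir.getD (k % nvir.length) 0))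
      = (List.range (nocc.length * (nocc.length * (nvir.length * nvir.length)))).map (fun k => decB nocc nvir (nocc.getD (k / (nocc.length * (nvir.length * nvir.length))) 0) (k % (nocc.length * (nvir.length * nvir.length)))) := by
    rw [show nocc.length * nocc.length * nvir.length * nvir.length = nocc.length * (nocc.length * (nvir.length * nvir.length)) by ring]
    apply List.map_congr_left
    intro k _
    have e1 : k / nvir.length / nvir.length / nocc.length
        = k / (nocc.length * (nvir.length * nvir.length)) := by
      rw [Nat.div_div_eq_div_mul, Nat.div_div_eq_div_mul]
      congr 1
      ring
    have e2 : k % (nocc.length * (nvir.length * nvir.length)) / nvir.length / nvir.length % nocc.length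
        = k / nvir.length / nvir.length % nocc.length := by
      rw [Nat.div_div_eq_div_mul, Nat.div_div_eq_div_mul,
        show nocc.length * (nvir.length * nvir.length) = nvir.length * nvir.length * nocc.length by ring,
        Nat.mod_mul_right_div_self, Nat.mod_mod_of_dvd _ (dvd_refl nocc.length)]
    have e3 : k % (nocc.length * (nvir.length * nvir.length)) / nvir.length % nvir.length
        = k / nvir.length % nvir.length := by
      rw [show nocc.length * (nvir.length * nvir.length) = nvir.length * (nvir.length * nocc.length) by ring,
        Nat.mod_mul_right_div_self, Nat.mod_mod_of_dvd _ (Dvd.intro nocc.length rfl)]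
    have e4 : k % (nocc.length * (nvir.length * nvir.length)) % nvir.length = k % nvir.length :=
      Nat.mod_mod_of_dvd _ ⟨nocc.length * nvir.length, by ring⟩
    unfold decB
    rw [e1, e2, e3, e4]
  have h2 := map_range_digit nocc 0 (nocc.length * (nvir.length * nvir.length)) (fun x r => decB nocc nvir x r)
  rw [h1, h2]
  congr 1
  funext x
  exact alt_stepB nocc nvir x

-- ===== VERDICT (by name: the statement is the Claim_ definition above) =====
theorem doubleexcitations_spec : Claim_equal_doubleexcitations := by
  intro nocc nvir _
  exact doubleexcitations_spec_core nocc nvir
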